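-- pv_equiv track=rewrite | github.com/anthony-tuininga/cx_PyOracleLib | cx_OracleObject/Object.py | __MergedPrivilegeSets
-- ===== SOURCE A (Python) =====
-- def __MergedPrivilegeSets(allPrivileges):
--     """Merge the privileges, if possible."""
--     privilegeDict = {}
--     allPrivileges.sort()
--     for adminOption, privilege in allPrivileges:
--         privileges = privilegeDict.get(adminOption)
--         if privileges is None:
--             privileges = privilegeDict[adminOption] = []
--         privileges.append(privilege)
--     return list(privilegeDict.items())
-- ===== SOURCE B (Python) =====
-- def __MergedPrivilegeSets(allPrivileges):
--     """Merge the privileges, if possible."""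
--     allPrivileges.sort()
--     result = []
--     i, n = 0, len(allPrivileges)
--     while i < n:
--         adminOption = allPrivileges[i][0]
--         j = i
--         while j < n and allPrivileges[j][0] == adminOption:
--             j += 1
--         result.append((adminOption, [p for _, p in allPrivileges[i:j]]))
--         i = j
--     return result
-- ===== Notes on version B (the rewrite author's own statement) =====
-- stated objective: alternative
-- what changed: B replaces A's dict-based accumulation (hash lookup/append per element) with adjacency-run grouping: after the same in-place sort, a two-pointer scan collects each maximal run of equal admin options directly, maintaining no dict at all.
import Mathlib
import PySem

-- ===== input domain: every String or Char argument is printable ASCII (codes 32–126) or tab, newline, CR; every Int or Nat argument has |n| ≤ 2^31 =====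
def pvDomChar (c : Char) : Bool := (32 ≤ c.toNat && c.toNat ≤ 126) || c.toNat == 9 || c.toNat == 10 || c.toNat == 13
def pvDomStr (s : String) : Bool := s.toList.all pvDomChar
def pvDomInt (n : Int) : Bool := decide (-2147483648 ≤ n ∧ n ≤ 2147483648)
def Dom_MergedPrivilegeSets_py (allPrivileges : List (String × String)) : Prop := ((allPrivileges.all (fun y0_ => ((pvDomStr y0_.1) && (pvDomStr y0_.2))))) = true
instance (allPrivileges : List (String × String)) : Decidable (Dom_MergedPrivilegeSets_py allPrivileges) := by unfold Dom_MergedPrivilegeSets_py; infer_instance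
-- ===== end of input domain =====

-- B replaces A's dict accumulation with adjacency-run grouping over the same sorted list (return values proved
-- equal; both Pythons perform A's in-place sort of the argument, the equivalence proved here is about the return value).


-- ===== PORT A =====
-- loop body: privileges = privilegeDict.get(adminOption); if None: privileges = privilegeDict[adminOption] = [];
-- privileges.append(privilege)  (the in-place append is modelled by re-inserting the extended list; insert overwrites in place)
def pvStepA (d : PySem.Dict String (List String)) (p : String × String) :
    PySem.Dict String (List String) :=
  match d.get? p.1 with
  | none => d.insert p.1 ([] ++ [p.2])
  | some privileges => d.insert p.1 (privileges ++ [p.2])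

def MergedPrivilegeSets_py (allPrivileges : List (String × String)) : List (String × List String) :=
  -- allPrivileges.sort(): Python sorts the pairs lexicographically (tuple order)
  let sortedPrivileges := PySem.List.sorted2 allPrivileges (fun p => p.1) (fun p => p.2)
  let privilegeDict := sortedPrivileges.foldl pvStepA PySem.Dict.empty
  privilegeDict.items

-- ===== PORT B =====
-- the two-pointer run scan of Source B: each step consumes one maximal run of equal admin options
def pvGroupRuns : List (String × String) → List (String × List String)
  | [] => []
  | (adminOption, privilege) :: rest =>
      (adminOption, privilege :: (rest.takeWhile (fun p => p.1 == adminOption)).map (fun p => p.2)) ::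
        pvGroupRuns (rest.dropWhile (fun p => p.1 == adminOption))
termination_by xs => xs.length
decreasing_by
  simp only [List.length_cons]
  exact Nat.lt_succ_of_le (List.length_dropWhile_le _ _)

def MergedPrivilegeSets_py_alt (allPrivileges : List (String × String)) : List (String × List String) :=
  pvGroupRuns (PySem.List.sorted2 allPrivileges (fun p => p.1) (fun p => p.2))

-- ===== PRECONDITION & SPEC =====
def Spec_MergedPrivilegeSets_py (allPrivileges : List (String × String)) (out : List (String × List String)) : Prop := out = MergedPrivilegeSets_py_alt allPrivileges
instance (allPrivileges : List (String × String)) (out : List (String × List String)) : Decidable (Spec_MergedPrivilegeSets_py allPrivileges out) := by unfold Spec_MergedPrivilegeSets_py; infer_instance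

-- ===== CLAIM (what is proved, stated in full; the proofs are below) =====
def Claim_equal_MergedPrivilegeSets_py : Prop := ∀ (allPrivileges : List (String × String)), Dom_MergedPrivilegeSets_py allPrivileges → Spec_MergedPrivilegeSets_py allPrivileges (MergedPrivilegeSets_py allPrivileges)

-- ===== LEMMAS AND PROOFS =====

-- inserting into a list that is pairwise "not before" preserves that shape, for an asymmetric transitive comparator
lemma pv_pairwise_insertBy {α : Type} (before : α → α → Bool)
    (hasym : ∀ a b, before a b = true → before b a = false)
    (htrans : ∀ a b c, before a b = true → before b c = true → before a c = true)
    (x : α) (ys : List α)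
    (h : ys.Pairwise (fun a b => before b a = false)) :
    (PySem.List.insertBy before x ys).Pairwise (fun a b => before b a = false) := by
  induction ys with
  | nil => simp [PySem.List.insertBy]
  | cons y ys ih =>
    rw [List.pairwise_cons] at h
    obtain ⟨hy, hys⟩ := h
    by_cases hb : before x y = true
    · simp only [PySem.List.insertBy, hb, if_true]
      refine List.Pairwise.cons ?_ (List.Pairwise.cons hy hys)
      intro z hz
      rcases List.mem_cons.mp hz with rfl | hz
      · exact hasym _ _ hb
      · by_contra hzx
        have hzx' : before z x = true := by
          cases hzy : before z x <;> simp_all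
        have := htrans _ _ _ hzx' hb
        rw [hy z hz] at this
        exact absurd this (by simp)
    · have hb' : before x y = false := by cases hxy : before x y <;> simp_all
      simp only [PySem.List.insertBy, hb', Bool.false_eq_true, if_false]
      refine List.Pairwise.cons ?_ (ih hys)
      intro z hz
      rcases (PySem.List.mem_insertBy _ _ _ _).mp hz with rfl | hz
      · exact hb'
      · exact hy z hz

-- the comparator sorted2 uses on (String × String) with keys fst, snd
def pvBefore (a b : String × String) : Bool :=
  decide (a.1 < b.1) || (!decide (b.1 < a.1) && decide (a.2 < b.2))

lemma pvBefore_iff (a b : String × String) :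
    pvBefore a b = true ↔ (a.1 < b.1 ∨ (¬ b.1 < a.1 ∧ a.2 < b.2)) := by
  simp only [pvBefore, Bool.or_eq_true, Bool.and_eq_true, Bool.not_eq_true',
    decide_eq_true_eq, decide_eq_false_iff_not]

lemma pvBefore_asym : ∀ a b, pvBefore a b = true → pvBefore b a = false := by
  intro a b h
  rw [pvBefore_iff] at h
  rw [show (pvBefore b a = false) ↔ ¬ pvBefore b a = true by simp, pvBefore_iff]
  push Not
  rcases h with h1 | ⟨h1, h2⟩
  · exact ⟨asymm h1, fun hn => absurd h1 hn⟩
  · exact ⟨h1, fun _ => asymm h2⟩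

lemma pvBefore_trans : ∀ a b c, pvBefore a b = true → pvBefore b c = true → pvBefore a c = true := by
  intro a b c hab hbc
  rw [pvBefore_iff] at hab hbc ⊢
  rcases hab with h1 | ⟨h1, h2⟩ <;> rcases hbc with g1 | ⟨g1, g2⟩
  · exact Or.inl (lt_trans h1 g1)
  · exact Or.inl (lt_of_lt_of_le h1 (not_lt.mp g1))
  · exact Or.inl (lt_of_le_of_lt (not_lt.mp h1) g1)
  · exact Or.inr ⟨fun h => h1 (lt_of_le_of_lt (not_lt.mp g1) h), lt_trans h2 g2⟩

-- the fully sorted list has non-decreasing admin options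
lemma pv_sorted2_fst_pairwise (xs : List (String × String)) :
    (PySem.List.sorted2 xs (fun p => p.1) (fun p => p.2)).Pairwise (fun a b => a.1 ≤ b.1) := by
  have key : ∀ (acc : List (String × String)),
      acc.Pairwise (fun a b => pvBefore b a = false) →
      (xs.foldl (fun acc x => PySem.List.insertBy pvBefore x acc) acc).Pairwise
        (fun a b => pvBefore b a = false) := by
    induction xs with
    | nil => intro acc h; simpa using h
    | cons x xs ih =>
      intro acc h
      exact ih _ (pv_pairwise_insertBy pvBefore pvBefore_asym pvBefore_trans x acc h)
  have hmain := key [] (by simp)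
  have hs : PySem.List.sorted2 xs (fun p => p.1) (fun p => p.2) =
      xs.foldl (fun acc x => PySem.List.insertBy pvBefore x acc) [] := by
    rfl
  rw [hs]
  refine hmain.imp ?_
  intro a b hba
  refine not_lt.mp (fun hlt => ?_)
  have : pvBefore b a = true := by rw [pvBefore_iff]; exact Or.inl hlt
  rw [this] at hba
  exact absurd hba (by simp)

-- running A's loop body over a run whose keys all equal k just extends the stored list
lemma pv_foldl_step_run (d : PySem.Dict String (List String)) (k : String)
    (run : List (String × String)) (hrun : ∀ p ∈ run, p.1 = k) :
    ∀ acc, run.foldl pvStepA (d.insert k acc) = d.insert k (acc ++ run.map (fun p => p.2)) := by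
  induction run with
  | nil => intro acc; simp
  | cons p run ih =>
    intro acc
    have hk : p.1 = k := hrun p (List.mem_cons_self)
    have hstep : pvStepA (d.insert k acc) p = d.insert k (acc ++ [p.2]) := by
      simp [pvStepA, hk, PySem.Dict.get?_insert_self, PySem.Dict.insert_insert_self]
    rw [List.foldl_cons, hstep, ih (fun q hq => hrun q (List.mem_cons_of_mem _ hq))]
    simp

-- A's dict accumulation over a key-sorted list, started from a dict disjoint from its keys, appends exactly B's runs
lemma pv_foldl_step_eq_groupRuns :
    ∀ (ys : List (String × String)) (d : PySem.Dict String (List String)),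
      ys.Pairwise (fun a b => a.1 ≤ b.1) →
      (∀ p ∈ ys, d.contains p.1 = false) →
      (ys.foldl pvStepA d).items = d.items ++ pvGroupRuns ys := by
  intro ys
  induction ys using pvGroupRuns.induct with
  | case1 => intro d _ _; simp [pvGroupRuns]
  | case2 k v rest ih =>
    intro d hs hd
    have hdk : d.contains k = false := hd (k, v) (by simp)
    have hget : d.get? k = none := by
      rw [PySem.Dict.get?_eq_none_iff_contains, hdk]
    have hsplit := List.takeWhile_append_dropWhile (p := fun p : String × String => p.1 == k) (l := rest)
    have hstep1 : pvStepA d (k, v) = d.insert k ([] ++ [v]) := by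
      simp [pvStepA, hget]
    -- the run phase
    have hrunkeys : ∀ p ∈ rest.takeWhile (fun p : String × String => p.1 == k), p.1 = k := by
      intro p hp
      have := List.mem_takeWhile_imp hp
      simpa using this
    have hrest : rest = rest.takeWhile (fun p : String × String => p.1 == k) ++
        rest.dropWhile (fun p : String × String => p.1 == k) := hsplit.symm
    -- every element after the run has admin option strictly greater than k
    have hgt : ∀ p ∈ rest.dropWhile (fun p : String × String => p.1 == k), k < p.1 := by
      intro p hp
      rcases hdrop : rest.dropWhile (fun p : String × String => p.1 == k) with _ | ⟨h, t⟩
      · rw [hdrop] at hp; simp at hp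
      · have hhead := List.head_dropWhile_not (fun p : String × String => p.1 == k)
          (l := rest) (by simp [hdrop])
        rw [hdrop] at hp
        simp only [hdrop, List.head_cons, beq_eq_false_iff_ne, ne_eq] at hhead
        have hhmem : h ∈ rest := by
          have : h ∈ rest.dropWhile (fun p : String × String => p.1 == k) := by simp [hdrop]
          exact (List.dropWhile_sublist _).mem this
        have hkh : k ≤ h.1 := by
          rw [List.pairwise_cons] at hs
          exact hs.1 h hhmem
        have hkh' : k < h.1 := lt_of_le_of_ne hkh (fun e => hhead e.symm)
        rcases List.mem_cons.mp hp with rfl | hp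
        · exact hkh'
        · have hpairs : (rest.dropWhile (fun p : String × String => p.1 == k)).Pairwise (fun a b => a.1 ≤ b.1) := by
            exact List.Pairwise.sublist (List.dropWhile_sublist _) ((List.pairwise_cons.mp hs).2)
          rw [hdrop, List.pairwise_cons] at hpairs
          exact lt_of_lt_of_le hkh' (hpairs.1 p hp)
    -- assemble
    rw [List.foldl_cons, hstep1]
    conv_lhs => rw [hrest]
    rw [List.foldl_append,
      pv_foldl_step_run d k _ hrunkeys ([] ++ [v])]
    rw [ih (d.insert k (([] ++ [v]) ++ (rest.takeWhile (fun p : String × String => p.1 == k)).map (fun p => p.2)))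
      (List.Pairwise.sublist (List.dropWhile_sublist _) ((List.pairwise_cons.mp hs).2))
      ?_]
    · rw [PySem.Dict.items_insert_of_not_contains d _ hdk]
      simp [pvGroupRuns]
    · intro p hp
      rw [PySem.Dict.contains_insert]
      have hne : p.1 ≠ k := ne_of_gt (hgt p hp)
      have hdp : d.contains p.1 = false := by
        refine hd p ?_
        exact List.mem_cons_of_mem _ ((List.dropWhile_sublist _).mem hp)
      simp [hne, hdp]

-- ===== VERDICT (by name: the statement is the Claim_ definition above) =====
theorem MergedPrivilegeSets_py_spec : Claim_equal_MergedPrivilegeSets_py := by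
  intro allPrivileges _
  unfold Spec_MergedPrivilegeSets_py MergedPrivilegeSets_py MergedPrivilegeSets_py_alt
  have := pv_foldl_step_eq_groupRuns
    (PySem.List.sorted2 allPrivileges (fun p => p.1) (fun p => p.2))
    PySem.Dict.empty
    (pv_sorted2_fst_pairwise allPrivileges)
    (by intro p _; simp [PySem.Dict.contains_empty])
  simpa using this
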